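-- pv_equiv track=rewrite | github.com/Ghost-Developmentx/cashly-ai | app/services/insights/async_insight_service.py | _calculate_date_range
-- ===== SOURCE A (Python) =====
-- from typing import Dict, List, Any
--
-- def _calculate_date_range(transactions: List[Dict[str, Any]]) -> Dict[str, str]:
--     """Calculate date range from transactions."""
--     if not transactions:
--         return {"start": "N/A", "end": "N/A"}
--
--     dates = [txn["date"] for txn in transactions]
--     return {
--         "start": min(dates),
--         "end": max(dates)
--     }
-- ===== SOURCE B (Python) =====
-- from typing import Dict, List, Any
--
-- def _calculate_date_range(transactions: List[Dict[str, Any]]) -> Dict[str, str]: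
--     """Calculate date range from transactions (single pass, no intermediate list)."""
--     if not transactions:
--         return {"start": "N/A", "end": "N/A"}
--     start = end = transactions[0]["date"]
--     for txn in transactions[1:]:
--         d = txn["date"]
--         if d < start:
--             start = d
--         if end < d:
--             end = d
--     return {"start": start, "end": end}
-- ===== Notes on version B (the rewrite author's own statement) =====
-- stated objective: alternative
-- what changed: Replaces the intermediate dates list plus two separate min/max scans by a single fold that tracks the running start and end in one pass.
-- outside the precondition, e.g. on _calculate_date_range([{'amount': '3'}]): A raises KeyError, B raises KeyError
import Mathlib
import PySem

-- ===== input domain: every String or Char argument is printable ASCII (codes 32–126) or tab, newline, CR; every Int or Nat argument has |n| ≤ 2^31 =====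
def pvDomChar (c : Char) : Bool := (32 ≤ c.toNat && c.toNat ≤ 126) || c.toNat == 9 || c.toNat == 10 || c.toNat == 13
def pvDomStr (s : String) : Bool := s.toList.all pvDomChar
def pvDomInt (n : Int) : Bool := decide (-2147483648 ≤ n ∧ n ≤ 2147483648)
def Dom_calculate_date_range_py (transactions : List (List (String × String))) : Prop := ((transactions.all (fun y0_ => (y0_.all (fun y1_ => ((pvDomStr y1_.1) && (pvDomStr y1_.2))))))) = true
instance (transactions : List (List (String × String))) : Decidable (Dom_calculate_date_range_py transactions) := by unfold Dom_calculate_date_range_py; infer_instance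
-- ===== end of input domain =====

-- B changes structure only (one fold instead of list + min + max); same values; equivalence is about the return value.

-- ===== PORT A =====
-- txn["date"] (KeyError when absent is excluded by Pre_; getD "" is exact under Pre_)
def pvDate (txn : List (String × String)) : String :=
  ((PySem.Dict.mk txn).get? "date").getD ""

def calculate_date_range_py (transactions : List (List (String × String))) : List (String × String) :=
  if transactions = [] then [("start", "N/A"), ("end", "N/A")]
  else
    let dates := transactions.map pvDate
    [("start", (PySem.List.min? dates (fun x => x)).getD ""),
     ("end", (PySem.List.max? dates (fun x => x)).getD "")]

-- ===== PORT B =====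
def calculate_date_range_py_alt (transactions : List (List (String × String))) : List (String × String) :=
  match transactions with
  | [] => [("start", "N/A"), ("end", "N/A")]
  | t :: rest =>
    let d0 := pvDate t
    let p := rest.foldl (fun (se : String × String) txn =>
      let d := pvDate txn
      (if d < se.1 then d else se.1, if se.2 < d then d else se.2)) (d0, d0)
    [("start", p.1), ("end", p.2)]

-- ===== PRECONDITION & SPEC =====
-- Pre_ excludes transactions missing the "date" key, on which Python A raises KeyError.
def Pre_calculate_date_range_py (transactions : List (List (String × String))) : Prop :=
  ∀ t ∈ transactions, t.any (fun kv => kv.1 == "date") = true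
instance (transactions : List (List (String × String))) : Decidable (Pre_calculate_date_range_py transactions) := by unfold Pre_calculate_date_range_py; infer_instance

def pvWitness_calculate_date_range_py : (List (List (String × String))) :=
  [[("date", "2024-01-02")], [("date", "2023-12-31"), ("x", "y")]]

def Spec_calculate_date_range_py (transactions : List (List (String × String))) (out : List (String × String)) : Prop := out = calculate_date_range_py_alt transactions
instance (transactions : List (List (String × String))) (out : List (String × String)) : Decidable (Spec_calculate_date_range_py transactions out) := by unfold Spec_calculate_date_range_py; infer_instance

-- ===== CLAIM (what is proved, stated in full; the proofs are below) =====
def Claim_equal_calculate_date_range_py : Prop := ∀ (transactions : List (List (String × String))), Dom_calculate_date_range_py transactions → Pre_calculate_date_range_py transactions → Spec_calculate_date_range_py transactions (calculate_date_range_py transactions)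

-- ===== LEMMAS AND PROOFS =====

-- B's pair fold is the componentwise running min / running max.
theorem pv_fold_pair (rest : List (List (String × String))) (s e : String) :
    rest.foldl (fun (se : String × String) txn =>
      let d := pvDate txn
      (if d < se.1 then d else se.1, if se.2 < d then d else se.2)) (s, e)
    = (rest.foldl (fun a txn => min a (pvDate txn)) s,
       rest.foldl (fun a txn => max a (pvDate txn)) e) := by
  induction rest generalizing s e with
  | nil => rfl
  | cons t ts ih =>
      simp only [List.foldl_cons, ih]
      congr 1
      · rcases lt_or_ge (pvDate t) s with h | h
        · simp [h, min_eq_right h.le]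
        · simp [not_lt_of_ge h, min_eq_left h]
      · rcases lt_or_ge e (pvDate t) with h | h
        · simp [h, max_eq_right h.le]
        · simp [not_lt_of_ge h, max_eq_left h]

-- ===== VERDICT (by name: the statement is the Claim_ definition above) =====
theorem calculate_date_range_py_spec : Claim_equal_calculate_date_range_py := by
  intro ts _ _
  unfold Spec_calculate_date_range_py calculate_date_range_py calculate_date_range_py_alt
  cases ts with
  | nil => rfl
  | cons t rest =>
      simp only [List.map_cons, pv_fold_pair, reduceCtorEq, if_false]
      rw [PySem.List.min?_id_cons, PySem.List.max?_id_cons]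
      simp [List.foldl_map]
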